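-- pv_equiv track=rewrite | github.com/jinfenglin/NLPBox | SENET/src/feature_extractors.py | __find_index_for_phrase
-- ===== SOURCE A (Python) =====
-- def __find_index_for_phrase(tags_list, phrase_tokens):
--     res = []
--     start_indices = []
--     for i, tk in enumerate(tags_list):
--         if phrase_tokens[0] == tk[0]:
--             start_indices.append(i)
--
--     for i in start_indices:
--         flag = True
--         for j in range(len(phrase_tokens)):
--             if i + j >= len(tags_list) or phrase_tokens[j] != tags_list[i + j][0]:
--                 flag = False
--                 break
--         if flag:
--             res = [n for n in range(i, i + len(phrase_tokens))]
--             return res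
--     return res
-- ===== SOURCE B (Python) =====
-- def __find_index_for_phrase(tags_list, phrase_tokens):
--     m = len(phrase_tokens)
--     if m == 0:
--         return []
--     # Knuth-Morris-Pratt failure table over the phrase tokens
--     fail = [0] * m
--     k = 0
--     for j in range(1, m):
--         while k > 0 and phrase_tokens[j] != phrase_tokens[k]:
--             k = fail[k - 1]
--         if phrase_tokens[j] == phrase_tokens[k]:
--             k += 1
--         fail[j] = k
--     # single left-to-right pass over the tagged words
--     k = 0
--     for i, (word, _tag) in enumerate(tags_list):
--         while k > 0 and word != phrase_tokens[k]:
--             k = fail[k - 1]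
--         if word == phrase_tokens[k]:
--             k += 1
--         if k == m:
--             start = i - m + 1
--             return list(range(start, start + m))
--     return []
-- ===== Notes on version B (the rewrite author's own statement) =====
-- stated objective: alternative
-- what changed: Replaces A's candidate-collection pass plus per-candidate rescan by Knuth-Morris-Pratt: build a failure table over the phrase tokens, then a single left-to-right pass over the words that never re-reads a consumed word (O(n+m) worst case vs A's O(n*m)).
import Mathlib
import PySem

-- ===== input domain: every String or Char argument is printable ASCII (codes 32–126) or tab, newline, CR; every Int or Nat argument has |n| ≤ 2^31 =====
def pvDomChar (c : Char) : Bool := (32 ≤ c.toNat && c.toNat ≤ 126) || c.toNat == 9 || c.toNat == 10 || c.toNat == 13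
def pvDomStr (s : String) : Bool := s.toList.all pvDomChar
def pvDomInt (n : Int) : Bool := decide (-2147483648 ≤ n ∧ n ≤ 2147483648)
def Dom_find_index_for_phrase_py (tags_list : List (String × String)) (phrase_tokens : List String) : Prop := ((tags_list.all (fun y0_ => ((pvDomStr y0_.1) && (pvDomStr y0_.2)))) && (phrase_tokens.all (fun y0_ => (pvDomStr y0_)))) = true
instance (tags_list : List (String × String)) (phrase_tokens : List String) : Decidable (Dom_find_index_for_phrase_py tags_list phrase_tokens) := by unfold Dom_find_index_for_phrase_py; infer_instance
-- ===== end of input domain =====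

-- B replaces A's candidate-collection + per-candidate rescan by Knuth-Morris-Pratt
-- (failure table over the phrase, one left-to-right pass over the words); objective: alternative algorithm.

-- ===== PORT A =====
-- first loop: collect i with phrase_tokens[0] == tags_list[i][0]
-- (phrase_tokens[0] would raise on empty phrase when the loop body runs; Pre_ excludes that, the getD default is never reached inside Pre_)
def pvAstart (tags_list : List (String × String)) (phrase_tokens : List String) : List Int :=
  (PySem.List.enumerate tags_list 0).foldl
    (fun acc p => if PySem.List.pyGetD phrase_tokens 0 "" == p.2.1 then acc ++ [p.1] else acc) []

-- inner 'for j in range(len(phrase_tokens))' with break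
def pvAinner (tags_list : List (String × String)) (phrase_tokens : List String) (i : Int) : List Int → Bool
  | [] => true
  | j :: js =>
    if (tags_list.length : Int) ≤ i + j
        || PySem.List.pyGetD phrase_tokens j "" != (PySem.List.pyGetD tags_list (i + j) ("", "")).1
    then false
    else pvAinner tags_list phrase_tokens i js

-- outer 'for i in start_indices' with early return
def pvAfind (tags_list : List (String × String)) (phrase_tokens : List String) : List Int → List Int
  | [] => []
  | i :: is =>
    if pvAinner tags_list phrase_tokens i (PySem.List.pyRange 0 phrase_tokens.length 1)
    then PySem.List.pyRange i (i + phrase_tokens.length) 1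
    else pvAfind tags_list phrase_tokens is

def find_index_for_phrase_py (tags_list : List (String × String)) (phrase_tokens : List String) : List Int :=
  pvAfind tags_list phrase_tokens (pvAstart tags_list phrase_tokens)

-- ===== PORT B =====
-- 'while k > 0 and c != phrase_tokens[k]: k = fail[k - 1]'   (fuel only makes the loop total;
-- with a valid failure table the loop strictly decreases k, so fuel = initial k is never exhausted)
def pvWhile (pat : List String) (fail : List Nat) (c : String) : Nat → Nat → Nat
  | 0, k => k
  | fuel + 1, k =>
    if k != 0 && c != pat.getD k "" then pvWhile pat fail c fuel (fail.getD (k - 1) 0) else k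

-- the shared loop body: while-loop then 'if c == phrase_tokens[k]: k += 1'
def pvStep (pat : List String) (fail : List Nat) (c : String) (k : Nat) : Nat :=
  let r := pvWhile pat fail c k k
  if c == pat.getD r "" then r + 1 else r

-- 'for j in range(1, m): … fail[j] = k'
def pvFailLoop (pat : List String) : List Nat → Nat → List Nat → List Nat
  | fail, _, [] => fail
  | fail, k, j :: js =>
    let k2 := pvStep pat fail (pat.getD j "") k
    pvFailLoop pat (fail.set j k2) k2 js

-- 'for i, (word, _tag) in enumerate(tags_list): … if k == m: return list(range(i - m + 1, i + 1))'
def pvSearch (pat : List String) (fail : List Nat) (m : Nat) : List (String × String) → Nat → Nat → List Int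
  | [], _, _ => []
  | (w, _) :: rest, i, k =>
    let k2 := pvStep pat fail w k
    if k2 = m then PySem.List.pyRange ((i : Int) - m + 1) ((i : Int) + 1) 1
    else pvSearch pat fail m rest (i + 1) k2

def find_index_for_phrase_py_alt (tags_list : List (String × String)) (phrase_tokens : List String) : List Int :=
  let m := phrase_tokens.length
  if m = 0 then []
  else
    pvSearch phrase_tokens
      (pvFailLoop phrase_tokens (List.replicate m 0) 0 (List.range' 1 (m - 1)))
      m tags_list 0 0

-- ===== PRECONDITION & SPEC =====
-- Pre_ excludes only the inputs where A raises IndexError (phrase_tokens[0] on an empty phrase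
-- with a non-empty tags_list); everywhere A returns, Pre_ holds.
def Pre_find_index_for_phrase_py (tags_list : List (String × String)) (phrase_tokens : List String) : Prop :=
  phrase_tokens ≠ [] ∨ tags_list = []
instance (tags_list : List (String × String)) (phrase_tokens : List String) : Decidable (Pre_find_index_for_phrase_py tags_list phrase_tokens) := by unfold Pre_find_index_for_phrase_py; infer_instance

def pvWitness_find_index_for_phrase_py : (List (String × String)) × List String :=
  ([("the", "DT"), ("cat", "NN"), ("sat", "VB")], ["cat", "sat"])

def Spec_find_index_for_phrase_py (tags_list : List (String × String)) (phrase_tokens : List String) (out : List Int) : Prop := out = find_index_for_phrase_py_alt tags_list phrase_tokens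
instance (tags_list : List (String × String)) (phrase_tokens : List String) (out : List Int) : Decidable (Spec_find_index_for_phrase_py tags_list phrase_tokens out) := by unfold Spec_find_index_for_phrase_py; infer_instance

-- ===== CLAIM (what is proved, stated in full; the proofs are below) =====
def Claim_equal_find_index_for_phrase_py : Prop := ∀ (tags_list : List (String × String)) (phrase_tokens : List String), Dom_find_index_for_phrase_py tags_list phrase_tokens → Pre_find_index_for_phrase_py tags_list phrase_tokens → Spec_find_index_for_phrase_py tags_list phrase_tokens (find_index_for_phrase_py tags_list phrase_tokens)


-- ===== LEMMAS AND PROOFS =====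

-- ---- the common reference form: first occurrence of the phrase in the word list ----

def pvNaiveInt (words pat : List String) : List Int :=
  match (PySem.List.pyRange 0 ((words.length : Int) - pat.length + 1) 1).find?
      (fun i => ((words.drop i.toNat).take pat.length == pat)) with
  | some i => PySem.List.pyRange i (i + pat.length) 1
  | none => []

def pvNaiveNat (words pat : List String) : List Int :=
  match (List.range (words.length + 1)).find?
      (fun p => ((words.drop p).take pat.length == pat)) with
  | some p => PySem.List.pyRange (p : Int) ((p : Int) + pat.length) 1
  | none => []

-- ---- generic find? facts ----

theorem find?_congr' {α : Type} (p q : α → Bool) (l : List α) (h : ∀ a ∈ l, p a = q a) :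
    l.find? p = l.find? q := by
  induction l with
  | nil => rfl
  | cons x xs ih =>
    rw [List.find?_cons, List.find?_cons, h x (List.mem_cons_self ..),
      ih (fun a ha => h a (List.mem_cons_of_mem _ ha))]

theorem find?_sorted_eq_some {α : Type} [LinearOrder α] (p : α → Bool) (L : List α)
    (h : L.Pairwise (· < ·)) (a : α) :
    L.find? p = some a ↔ (a ∈ L ∧ p a = true ∧ ∀ b ∈ L, p b = true → a ≤ b) := by
  induction L with
  | nil => simp
  | cons x xs ih =>
    obtain ⟨hx, hxs⟩ := List.pairwise_cons.mp h
    rw [List.find?_cons]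
    by_cases hp : p x = true
    · simp only [hp]
      constructor
      · intro he
        have hax : a = x := by injection he with h'; exact h'.symm
        subst hax
        exact ⟨List.mem_cons_self .., hp,
          fun b hb _ => by
            rcases List.mem_cons.mp hb with rfl | hb
            · exact le_refl _
            · exact le_of_lt (hx b hb)⟩
      · rintro ⟨h1, h2, h3⟩
        have hax : a = x := by
          rcases List.mem_cons.mp h1 with rfl | h1
          · rfl
          · exact absurd (h3 x (List.mem_cons_self ..) hp) (not_le.mpr (hx a h1))
        rw [hax]
    · rw [Bool.not_eq_true] at hp
      simp only [hp]
      rw [ih hxs]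
      constructor
      · rintro ⟨h1, h2, h3⟩
        exact ⟨List.mem_cons_of_mem _ h1, h2, fun b hb pb => by
          rcases List.mem_cons.mp hb with rfl | hb
          · simp [pb] at hp
          · exact h3 b hb pb⟩
      · rintro ⟨h1, h2, h3⟩
        have ha : a ∈ xs := by
          rcases List.mem_cons.mp h1 with rfl | h1
          · simp [h2] at hp
          · exact h1
        exact ⟨ha, h2, fun b hb pb => h3 b (List.mem_cons_of_mem _ hb) pb⟩

theorem find?_sorted_congr (p : Int → Bool) (L1 L2 : List Int)
    (h1 : L1.Pairwise (· < ·)) (h2 : L2.Pairwise (· < ·))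
    (hmem : ∀ x, p x = true → (x ∈ L1 ↔ x ∈ L2)) : L1.find? p = L2.find? p := by
  cases hf : L1.find? p with
  | none =>
    rw [List.find?_eq_none] at hf
    symm
    rw [List.find?_eq_none]
    intro b hb pb
    exact hf b ((hmem b pb).mpr hb) pb
  | some a =>
    obtain ⟨ha1, ha2, ha3⟩ := (find?_sorted_eq_some p L1 h1 a).mp hf
    symm
    rw [find?_sorted_eq_some p L2 h2 a]
    exact ⟨(hmem a ha2).mp ha1, ha2,
      fun b hb pb => ha3 b ((hmem b pb).mpr hb) pb⟩

-- ---- A-side lemmas (A equals the reference form) ----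

theorem map_fst_getD (l : List (String × String)) (t : Nat) :
    (l.map Prod.fst).getD t "" = (l.getD t ("", "")).1 := by
  by_cases h : t < l.length
  · rw [List.getD_eq_getElem _ _ (by simpa using h), List.getD_eq_getElem _ _ h]
    simp
  · rw [List.getD_eq_default _ _ (by simpa using not_lt.mp h),
      List.getD_eq_default _ _ (not_lt.mp h)]

theorem take_drop_eq_iff (ws ph : List String) (k : Nat) :
    ((ws.drop k).take ph.length = ph) ↔
      (∀ j < ph.length, k + j < ws.length ∧ ph.getD j "" = ws.getD (k + j) "") := by
  constructor
  · intro h j hj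
    have hlen : ph.length ≤ ws.length - k := by
      have := congrArg List.length h
      simp [List.length_take, List.length_drop] at this
      omega
    have hkj : k + j < ws.length := by omega
    refine ⟨hkj, ?_⟩
    have hq : ph[j]? = ws[k + j]? := by
      conv_lhs => rw [← h]
      simp [List.getElem?_drop, hj]
    rw [List.getD_eq_getElem?_getD, List.getD_eq_getElem?_getD, hq]
  · intro h
    apply List.ext_getElem?
    intro j
    simp only [List.getElem?_take, List.getElem?_drop]
    by_cases hj : j < ph.length
    · obtain ⟨hb, hv⟩ := h j hj
      rw [if_pos hj, List.getElem?_eq_getElem hb, List.getElem?_eq_getElem hj]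
      rw [List.getD_eq_getElem _ _ hj, List.getD_eq_getElem _ _ hb] at hv
      simp [hv]
    · rw [if_neg hj, List.getElem?_eq_none (not_lt.mp hj)]

theorem pvAinner_all (tags_list : List (String × String)) (phrase_tokens : List String) (i : Int)
    (js : List Int) :
    pvAinner tags_list phrase_tokens i js =
      js.all (fun j => !(decide ((tags_list.length : Int) ≤ i + j))
        && (PySem.List.pyGetD phrase_tokens j "" == (PySem.List.pyGetD tags_list (i + j) ("", "")).1)) := by
  induction js with
  | nil => rfl
  | cons j js ih =>
    rw [pvAinner, List.all_cons, ← ih]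
    split
    · rename_i hc
      simp only [bne, Bool.or_eq_true, decide_eq_true_eq, Bool.not_eq_true'] at hc
      rcases hc with hc | hc
      · simp [hc]
      · simp [hc]
    · rename_i hc
      simp only [bne, Bool.or_eq_true, decide_eq_true_eq, Bool.not_eq_true'] at hc
      push Not at hc
      simp [hc.1, hc.2]

theorem pvAinner_eq (tags_list : List (String × String)) (phrase_tokens : List String) (k : Nat) :
    pvAinner tags_list phrase_tokens (k : Int) (PySem.List.pyRange 0 phrase_tokens.length 1) =
      (((tags_list.map Prod.fst).drop k).take phrase_tokens.length == phrase_tokens) := by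
  rw [pvAinner_all, Bool.eq_iff_iff, beq_iff_eq, take_drop_eq_iff, PySem.List.pyRange_one]
  simp only [List.all_map, List.all_eq_true, List.mem_range, Function.comp_apply, zero_add,
    Int.sub_zero, Int.toNat_natCast, Bool.and_eq_true, Bool.not_eq_true', decide_eq_false_iff_not,
    not_le, beq_iff_eq, ← Nat.cast_add, PySem.List.pyGetD_natCast, List.length_map, map_fst_getD]
  constructor
  · intro h j hj
    obtain ⟨h1, h2⟩ := h j hj
    exact ⟨by exact_mod_cast h1, h2⟩
  · intro h j hj
    obtain ⟨h1, h2⟩ := h j hj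
    exact ⟨by exact_mod_cast h1, h2⟩

theorem pvAfind_find (tags_list : List (String × String)) (phrase_tokens : List String) (L : List Int) :
    pvAfind tags_list phrase_tokens L =
      match L.find? (fun i => pvAinner tags_list phrase_tokens i (PySem.List.pyRange 0 phrase_tokens.length 1)) with
      | some i => PySem.List.pyRange i (i + phrase_tokens.length) 1
      | none => [] := by
  induction L with
  | nil => rfl
  | cons i is ih =>
    rw [pvAfind, List.find?_cons]
    by_cases hc : pvAinner tags_list phrase_tokens i (PySem.List.pyRange 0 phrase_tokens.length 1) = true
    · simp [hc]
    · simp only [Bool.not_eq_true] at hc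
      simp [hc, ih]

theorem pvAstart_eq (tags_list : List (String × String)) (phrase_tokens : List String) :
    pvAstart tags_list phrase_tokens =
      ((PySem.List.enumerate tags_list 0).filter
        (fun q => PySem.List.pyGetD phrase_tokens 0 "" == q.2.1)).map (fun q => q.1) := by
  rw [pvAstart, PySem.List.foldl_append_if]
  simp

-- A equals the Int reference form (for a non-empty phrase)
theorem pvA_eq_naiveInt (tags_list : List (String × String)) (phrase_tokens : List String)
    (hph : phrase_tokens ≠ []) :
    find_index_for_phrase_py tags_list phrase_tokens =
      pvNaiveInt (tags_list.map Prod.fst) phrase_tokens := by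
  have hm : 0 < phrase_tokens.length := List.length_pos_of_ne_nil hph
  simp only [find_index_for_phrase_py, pvNaiveInt]
  rw [pvAfind_find]
  set Mb : Int → Bool :=
    fun i => (((tags_list.map Prod.fst).drop i.toNat).take phrase_tokens.length == phrase_tokens)
    with hMb
  have hA : (pvAstart tags_list phrase_tokens).find?
      (fun i => pvAinner tags_list phrase_tokens i (PySem.List.pyRange 0 phrase_tokens.length 1)) =
      (pvAstart tags_list phrase_tokens).find? Mb := by
    apply find?_congr'
    intro a ha
    rw [pvAstart_eq] at ha
    obtain ⟨q, hq, rfl⟩ := List.mem_map.mp ha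
    obtain ⟨hqe, _⟩ := List.mem_filter.mp hq
    obtain ⟨k, hk, rfl⟩ := (PySem.List.mem_enumerate_iff _ _ _).mp hqe
    simp only [zero_add]
    rw [pvAinner_eq, hMb]
    simp
  rw [hA]
  have hsorted1 : (pvAstart tags_list phrase_tokens).Pairwise (· < ·) := by
    rw [pvAstart_eq, List.pairwise_map]
    exact (PySem.List.pairwise_lt_enumerate tags_list 0).filter _
  have hsorted2 : (PySem.List.pyRange 0 (((tags_list.map Prod.fst).length : Int) - phrase_tokens.length + 1) 1).Pairwise (· < ·) :=
    PySem.List.pairwise_lt_pyRange_one ..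
  have hmem : ∀ x, Mb x = true →
      (x ∈ pvAstart tags_list phrase_tokens ↔
        x ∈ PySem.List.pyRange 0 (((tags_list.map Prod.fst).length : Int) - phrase_tokens.length + 1) 1) := by
    intro x hMx
    constructor
    · intro hx
      rw [pvAstart_eq] at hx
      obtain ⟨q, hq, rfl⟩ := List.mem_map.mp hx
      obtain ⟨hqe, _⟩ := List.mem_filter.mp hq
      obtain ⟨k, hk, rfl⟩ := (PySem.List.mem_enumerate_iff _ _ _).mp hqe
      simp only [zero_add] at hMx ⊢
      rw [hMb] at hMx
      simp only [Int.toNat_natCast, beq_iff_eq] at hMx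
      have hlen : phrase_tokens.length ≤ (tags_list.map Prod.fst).length - k := by
        have := congrArg List.length hMx
        simp only [List.length_take, List.length_drop] at this
        omega
      rw [PySem.List.mem_pyRange_one]
      refine ⟨Int.natCast_nonneg k, ?_⟩
      simp only [List.length_map] at hlen ⊢
      omega
    · intro hx
      have h0 : 0 ≤ x := (PySem.List.mem_pyRange_one.mp hx).1
      obtain ⟨k, rfl⟩ : ∃ k : Nat, x = (k : Int) := ⟨x.toNat, (Int.toNat_of_nonneg h0).symm⟩
      rw [hMb] at hMx
      simp only [Int.toNat_natCast, beq_iff_eq] at hMx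
      have h00 := (take_drop_eq_iff (tags_list.map Prod.fst) phrase_tokens k).mp hMx 0 hm
      have hkn : k < tags_list.length := by
        have := h00.1
        simp only [List.length_map] at this
        omega
      rw [pvAstart_eq]
      apply List.mem_map.mpr
      refine ⟨((0 : Int) + k, tags_list[k]'hkn), ?_, by simp⟩
      apply List.mem_filter.mpr
      refine ⟨(PySem.List.mem_enumerate_iff _ _ _).mpr ⟨k, hkn, rfl⟩, ?_⟩
      simp only [beq_iff_eq, PySem.List.pyGetD_zero]
      have hv : (tags_list.map Prod.fst).getD (k + 0) "" = tags_list[k].1 := by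
        rw [Nat.add_zero, List.getD_eq_getElem _ _ (by simpa using hkn)]
        simp
      exact h00.2.trans hv
  rw [find?_sorted_congr Mb _ _ hsorted1 hsorted2 hmem]

-- occurrence fact: a match needs room
theorem pvOcc_le (words pat : List String) (p : Nat) (hph : pat ≠ [])
    (h : (words.drop p).take pat.length = pat) : p + pat.length ≤ words.length := by
  have hm : 0 < pat.length := List.length_pos_of_ne_nil hph
  have := congrArg List.length h
  simp only [List.length_take, List.length_drop] at this
  omega

-- the Int and Nat reference forms agree (non-empty phrase)
theorem pvNaiveInt_eq_nat (words pat : List String) (hph : pat ≠ []) :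
    pvNaiveInt words pat = pvNaiveNat words pat := by
  have hm : 0 < pat.length := List.length_pos_of_ne_nil hph
  unfold pvNaiveInt pvNaiveNat
  cases hN : (List.range (words.length + 1)).find?
      (fun p => ((words.drop p).take pat.length == pat)) with
  | none =>
    have hI : (PySem.List.pyRange 0 ((words.length : Int) - pat.length + 1) 1).find?
        (fun i => ((words.drop i.toNat).take pat.length == pat)) = none := by
      rw [List.find?_eq_none]
      intro i hi
      have h0 : 0 ≤ i := (PySem.List.mem_pyRange_one.mp hi).1
      intro hpred
      have hocc : (words.drop i.toNat).take pat.length = pat := by simpa using hpred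
      have hmem : i.toNat ∈ List.range (words.length + 1) := by
        rw [List.mem_range]
        have := pvOcc_le words pat i.toNat hph hocc
        omega
      have := List.find?_eq_none.mp hN i.toNat hmem
      simp [hocc] at this
    rw [hI]
  | some p =>
    obtain ⟨hp1, hp2, hp3⟩ := (find?_sorted_eq_some _ _ (List.pairwise_lt_range) p).mp hN
    have hocc : (words.drop p).take pat.length = pat := by simpa using hp2
    have hle := pvOcc_le words pat p hph hocc
    have hI : (PySem.List.pyRange 0 ((words.length : Int) - pat.length + 1) 1).find?
        (fun i => ((words.drop i.toNat).take pat.length == pat)) = some (p : Int) := by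
      rw [find?_sorted_eq_some _ _ (PySem.List.pairwise_lt_pyRange_one ..) _]
      refine ⟨PySem.List.mem_pyRange_one.mpr ⟨Int.natCast_nonneg p, by omega⟩, by simpa using hp2, ?_⟩
      intro b hb pb
      have hb0 : 0 ≤ b := (PySem.List.mem_pyRange_one.mp hb).1
      obtain ⟨q, rfl⟩ : ∃ q : Nat, b = (q : Int) := ⟨b.toNat, (Int.toNat_of_nonneg hb0).symm⟩
      have hoccq : (words.drop q).take pat.length = pat := by simpa using pb
      have hq : q ∈ List.range (words.length + 1) := by
        rw [List.mem_range]
        have := pvOcc_le words pat q hph hoccq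
        omega
      have := hp3 q hq (by simpa using pb)
      exact_mod_cast this
    rw [hI]

-- ---- suffix toolbox ----

theorem pvSuffix_of_suffix_le (s1 s2 t : List String) (h1 : s1 <:+ t) (h2 : s2 <:+ t)
    (hl : s1.length ≤ s2.length) : s1 <:+ s2 := by
  obtain ⟨u1, hu1⟩ := h1
  obtain ⟨u2, hu2⟩ := h2
  have heq : u2 ++ s2 = u1 ++ s1 := by rw [hu1, hu2]
  rcases List.append_eq_append_iff.mp heq with ⟨a', ha1, ha2⟩ | ⟨c', hc1, hc2⟩
  · exact ⟨a', ha2.symm⟩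
  · have : c' = [] := by
      have hlen := congrArg List.length hc2
      simp at hlen
      exact List.eq_nil_of_length_eq_zero (by omega)
    subst this
    exact ⟨[], by simp [hc2]⟩

theorem pvAppend_singleton_suffix (a b : List String) (x y : String) :
    a ++ [x] <:+ b ++ [y] ↔ x = y ∧ a <:+ b := by
  constructor
  · rintro ⟨u, hu⟩
    rw [← List.append_assoc] at hu
    obtain ⟨h1, h2⟩ := List.append_inj' hu (by simp)
    refine ⟨by simpa using h2, u, h1⟩
  · rintro ⟨rfl, u, hu⟩
    exact ⟨u, by rw [← List.append_assoc, hu]⟩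

theorem pvTake_succ_eq (pat : List String) (j : Nat) (h : j < pat.length) :
    pat.take (j + 1) = pat.take j ++ [pat.getD j ""] := by
  rw [List.take_add_one, List.getElem?_eq_getElem h, List.getD_eq_getElem _ _ h]
  rfl

-- ---- the border function ----

def pvBord (pat t : List String) : Nat :=
  Nat.findGreatest (fun j => pat.take j <:+ t) pat.length

theorem pvBord_le (pat t : List String) : pvBord pat t ≤ pat.length :=
  Nat.findGreatest_le _

theorem pvBord_suffix (pat t : List String) : pat.take (pvBord pat t) <:+ t :=
  Nat.findGreatest_spec (P := fun j => pat.take j <:+ t) (Nat.zero_le _) (by simp)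

theorem pvLe_bord (pat t : List String) (j : Nat) (hj : j ≤ pat.length)
    (h : pat.take j <:+ t) : j ≤ pvBord pat t :=
  Nat.le_findGreatest hj h

theorem pvBord_le_length (pat t : List String) : pvBord pat t ≤ t.length := by
  have h := pvBord_suffix pat t
  have := h.length_le
  rw [List.length_take] at this
  have hb := pvBord_le pat t
  omega

theorem pvBord_nil (pat : List String) : pvBord pat [] = 0 := by
  have := pvBord_le_length pat []
  simpa using this

-- ---- B-side: KMP correctness ----

def pvFailOK (pat : List String) (fail : List Nat) (B : Nat) : Prop :=
  ∀ q, 1 ≤ q → q ≤ B → fail.getD (q - 1) 0 = pvBord pat ((pat.take q).drop 1)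

theorem pvFindGreatest_congr (P Q : Nat → Prop) [DecidablePred P] [DecidablePred Q] (n : Nat)
    (h : ∀ j ≤ n, (P j ↔ Q j)) : Nat.findGreatest P n = Nat.findGreatest Q n := by
  induction n with
  | zero => rfl
  | succ n ih =>
    rw [Nat.findGreatest_succ, Nat.findGreatest_succ]
    by_cases hp : P (n + 1)
    · rw [if_pos hp, if_pos ((h (n + 1) le_rfl).mp hp)]
    · rw [if_neg hp, if_neg (fun hq => hp ((h (n + 1) le_rfl).mpr hq)),
        ih (fun j hj => h j (hj.trans (Nat.le_succ n)))]

theorem pvLen_take_drop1 (pat : List String) (j : Nat) (hj : j ≤ pat.length) :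
    ((pat.take j).drop 1).length = j - 1 := by
  simp [List.length_take]
  omega

-- a shorter border of a phrase prefix survives into the failure-chain step
theorem pvNest (pat : List String) (k j : Nat) (hk : k ≤ pat.length) (hjk : j < k)
    (hj : pat.take j <:+ pat.take k) :
    j ≤ pvBord pat ((pat.take k).drop 1) ∧
      pat.take j <:+ pat.take (pvBord pat ((pat.take k).drop 1)) := by
  have hdrop : (pat.take k).drop 1 <:+ pat.take k := List.drop_suffix _ _
  have hj' : pat.take j <:+ (pat.take k).drop 1 := by
    apply pvSuffix_of_suffix_le _ _ _ hj hdrop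
    rw [pvLen_take_drop1 pat k hk]
    simp [List.length_take]
    omega
  have hjb : j ≤ pvBord pat ((pat.take k).drop 1) :=
    pvLe_bord _ _ _ (by omega) hj'
  refine ⟨hjb, pvSuffix_of_suffix_le _ _ _ hj' (pvBord_suffix _ _) ?_⟩
  have hble := pvBord_le pat ((pat.take k).drop 1)
  rw [List.length_take, List.length_take]
  omega

theorem pvWhile_spec (pat : List String) (fail : List Nat) (c : String) :
    ∀ fuel k, k ≤ fuel → k < pat.length → pvFailOK pat fail k →
    (pat.take (pvWhile pat fail c fuel k) <:+ pat.take k ∧ pvWhile pat fail c fuel k ≤ k) ∧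
    (pvWhile pat fail c fuel k = 0 ∨ c = pat.getD (pvWhile pat fail c fuel k) "") ∧
    (∀ j, j ≤ k → pat.take j <:+ pat.take k → c = pat.getD j "" →
      j ≤ pvWhile pat fail c fuel k) := by
  intro fuel
  induction fuel with
  | zero =>
    intro k hk _ _
    have hk0 : k = 0 := by omega
    subst hk0
    refine ⟨⟨List.suffix_refl _, le_rfl⟩, Or.inl rfl, ?_⟩
    intro j hj _ _
    omega
  | succ fuel ih =>
    intro k hkf hkm hfc
    rw [pvWhile]
    by_cases hcond : (k != 0 && c != pat.getD k "") = true
    · rw [if_pos hcond]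
      simp only [Bool.and_eq_true, bne_iff_ne, ne_eq] at hcond
      obtain ⟨hk0', hcne'⟩ := hcond
      have hkval : fail.getD (k - 1) 0 = pvBord pat ((pat.take k).drop 1) :=
        hfc k (by omega) le_rfl
      have hk'le : fail.getD (k - 1) 0 ≤ k - 1 := by
        rw [hkval]
        have := pvBord_le_length pat ((pat.take k).drop 1)
        rw [pvLen_take_drop1 pat k (le_of_lt hkm)] at this
        exact this
      have hfc' : pvFailOK pat fail (fail.getD (k - 1) 0) :=
        fun q h1 h2 => hfc q h1 (by omega)
      obtain ⟨⟨ha1, ha2⟩, hb, hmax⟩ :=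
        ih (fail.getD (k - 1) 0) (by omega) (by omega) hfc'
      refine ⟨⟨?_, by omega⟩, hb, ?_⟩
      · apply ha1.trans
        apply List.IsSuffix.trans _ (List.drop_suffix 1 (pat.take k))
        rw [hkval]
        exact pvBord_suffix _ _
      · intro j hj hsuf hch
        rcases Nat.lt_or_ge j k with hjk | hjk
        · obtain ⟨hj1, hj2⟩ := pvNest pat k j (le_of_lt hkm) hjk hsuf
          rw [← hkval] at hj1 hj2
          exact hmax j hj1 hj2 hch
        · have : j = k := by omega
          subst this
          exact absurd hch hcne'
    · rw [if_neg hcond]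
      simp only [Bool.and_eq_true, bne_iff_ne, ne_eq, not_and, not_not] at hcond
      have hdis : k = 0 ∨ c = pat.getD k "" := by
        rcases eq_or_ne k 0 with h | h
        · exact Or.inl h
        · exact Or.inr (hcond h)
      exact ⟨⟨List.suffix_refl _, le_rfl⟩, hdis, fun j hj _ _ => hj⟩

theorem pvStep_spec (pat : List String) (fail : List Nat) (c : String) (k : Nat)
    (hkm : k < pat.length) (hfc : pvFailOK pat fail k) :
    pvStep pat fail c k = pvBord pat (pat.take k ++ [c]) := by
  obtain ⟨⟨ha1, ha2⟩, hb, hmax⟩ := pvWhile_spec pat fail c k k le_rfl hkm hfc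
  set r := pvWhile pat fail c k k with hr
  symm
  unfold pvBord pvStep
  rw [← hr]
  rw [Nat.findGreatest_eq_iff]
  by_cases hcm : c = pat.getD r ""
  · rw [if_pos (beq_iff_eq.mpr hcm)]
    refine ⟨by omega, ?_, ?_⟩
    · intro _
      rw [pvTake_succ_eq pat r (by omega), ← hcm]
      exact (pvAppend_singleton_suffix _ _ _ _).mpr ⟨rfl, ha1⟩
    · intro n hn hnm hsuf
      rw [show n = (n - 1) + 1 by omega, pvTake_succ_eq pat (n - 1) (by omega)] at hsuf
      obtain ⟨hxy, hsf⟩ := (pvAppend_singleton_suffix _ _ _ _).mp hsuf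
      have hlej : n - 1 ≤ k := by
        have := hsf.length_le
        simp [List.length_take] at this
        omega
      have := hmax (n - 1) hlej hsf hxy.symm
      omega
  · rw [if_neg (by simpa using hcm)]
    have hr0 : r = 0 := by
      rcases hb with h | h
      · exact h
      · exact absurd h hcm
    refine ⟨by omega, fun h => absurd hr0 h, ?_⟩
    intro n hn hnm hsuf
    rw [show n = (n - 1) + 1 by omega, pvTake_succ_eq pat (n - 1) (by omega)] at hsuf
    obtain ⟨hxy, hsf⟩ := (pvAppend_singleton_suffix _ _ _ _).mp hsuf
    have hlej : n - 1 ≤ k := by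
      have := hsf.length_le
      simp [List.length_take] at this
      omega
    have hler := hmax (n - 1) hlej hsf hxy.symm
    have : n = 1 := by omega
    subst this
    simp at hler
    exact hcm (by rw [hr0]; exact hxy.symm)

-- extending the text by one word: only the current border matters
theorem pvBord_append (pat t : List String) (c : String) (k : Nat)
    (hkb : pvBord pat t = k) :
    pvBord pat (t ++ [c]) = pvBord pat (pat.take k ++ [c]) := by
  unfold pvBord
  apply pvFindGreatest_congr
  intro j hj
  cases j with
  | zero => simp
  | succ j' =>
    have hj' : j' < pat.length := by omega
    rw [pvTake_succ_eq pat j' hj', pvAppend_singleton_suffix, pvAppend_singleton_suffix]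
    constructor
    · rintro ⟨hx, hs⟩
      refine ⟨hx, ?_⟩
      have hjb : j' ≤ pvBord pat t := pvLe_bord pat t j' (le_of_lt hj') hs
      have hkt : pat.take k <:+ t := hkb ▸ pvBord_suffix pat t
      apply pvSuffix_of_suffix_le _ _ _ hs hkt
      simp [List.length_take]
      omega
    · rintro ⟨hx, hs⟩
      exact ⟨hx, hs.trans (hkb ▸ pvBord_suffix pat t)⟩

theorem pvGetD_set_self (l : List Nat) (i : Nat) (v : Nat) (h : i < l.length) :
    (l.set i v).getD i 0 = v := by
  rw [List.getD_eq_getElem?_getD, List.getElem?_set_self (by simpa using h)]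
  rfl

theorem pvGetD_set_ne (l : List Nat) (i j : Nat) (v : Nat) (h : i ≠ j) :
    (l.set i v).getD j 0 = l.getD j 0 := by
  rw [List.getD_eq_getElem?_getD, List.getElem?_set_ne h, ← List.getD_eq_getElem?_getD]

theorem pvFailLoop_spec (pat : List String) :
    ∀ (cnt j : Nat) (fail : List Nat) (k : Nat),
    1 ≤ j → j + cnt = pat.length → fail.length = pat.length →
    pvFailOK pat fail j → k = pvBord pat ((pat.take j).drop 1) →
    pvFailOK pat (pvFailLoop pat fail k (List.range' j cnt)) pat.length := by
  intro cnt
  induction cnt with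
  | zero =>
    intro j fail k h1 h2 h3 h4 h5
    rw [List.range'_zero]
    have hj : j = pat.length := by omega
    subst hj
    exact h4
  | succ cnt ih =>
    intro j fail k h1 h2 hlen hfc hk
    rw [List.range'_succ]
    rw [pvFailLoop]
    have hjm : j < pat.length := by omega
    have hkj : k ≤ j - 1 := by
      rw [hk]
      have := pvBord_le_length pat ((pat.take j).drop 1)
      rw [pvLen_take_drop1 pat j (le_of_lt hjm)] at this
      exact this
    have hkm : k < pat.length := by omega
    have hfck : pvFailOK pat fail k := fun q hq1 hq2 => hfc q hq1 (by omega)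
    have hstep := pvStep_spec pat fail (pat.getD j "") k hkm hfck
    have htrans := pvBord_append pat ((pat.take j).drop 1) (pat.getD j "") k hk.symm
    have hsucc : (pat.take (j + 1)).drop 1 = (pat.take j).drop 1 ++ [pat.getD j ""] := by
      rw [pvTake_succ_eq pat j hjm, List.drop_append_of_le_length (by simp [List.length_take]; omega)]
    have hk2v : pvStep pat fail (pat.getD j "") k = pvBord pat ((pat.take (j + 1)).drop 1) := by
      rw [hstep, ← htrans, hsucc]
    apply ih (j + 1) _ _ (by omega) (by omega) (by simpa using hlen) ?_ hk2v
    intro q hq1 hq2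
    rcases Nat.lt_or_ge q (j + 1) with hlt | hge
    · rw [pvGetD_set_ne _ _ _ _ (by omega)]
      exact hfc q hq1 (by omega)
    · have : q = j + 1 := by omega
      subst this
      rw [show j + 1 - 1 = j from rfl, pvGetD_set_self _ _ _ (by omega)]
      exact hk2v

theorem pvOcc_suffix (words pat : List String) (p : Nat)
    (h : (words.drop p).take pat.length = pat) :
    pat <:+ words.take (p + pat.length) :=
  ⟨words.take p, by rw [List.take_add, h]⟩

theorem pvSearch_spec (pat : List String) (fail : List Nat) (hph : pat ≠ [])
    (hfc : pvFailOK pat fail pat.length) :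
    ∀ (rest : List (String × String)) (done : List String) (k : Nat),
    k = pvBord pat done → k < pat.length →
    (∀ p, p + pat.length ≤ done.length →
      ¬ (((done ++ rest.map Prod.fst).drop p).take pat.length = pat)) →
    pvSearch pat fail pat.length rest done.length k =
      pvNaiveNat (done ++ rest.map Prod.fst) pat := by
  intro rest
  induction rest with
  | nil =>
    intro done k hk hkm hno
    simp only [List.map_nil, List.append_nil] at hno ⊢
    rw [pvSearch]
    unfold pvNaiveNat
    have hfind : (List.range (done.length + 1)).find?
        (fun p => ((done.drop p).take pat.length == pat)) = none := by
      rw [List.find?_eq_none]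
      intro p _ hpred
      have hocc : (done.drop p).take pat.length = pat := by simpa using hpred
      exact hno p (pvOcc_le done pat p hph hocc) hocc
    rw [hfind]
  | cons wt rest' ih =>
    intro done k hk hkm hno
    obtain ⟨w, tg⟩ := wt
    rw [pvSearch]
    have hwords : done ++ ((w, tg) :: rest').map Prod.fst = (done ++ [w]) ++ rest'.map Prod.fst := by
      simp
    have hfck : pvFailOK pat fail k := fun q h1 h2 => hfc q h1 (by omega)
    have hstep := pvStep_spec pat fail w k hkm hfck
    have htrans := pvBord_append pat done w k hk.symm
    have hk2 : pvStep pat fail w k = pvBord pat (done ++ [w]) := by rw [hstep, htrans]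
    set words := done ++ ((w, tg) :: rest').map Prod.fst with hwd
    have hlw : words.length = done.length + 1 + (rest'.map Prod.fst).length := by
      rw [hwd]; simp; omega
    have htake : words.take (done.length + 1) = done ++ [w] := by
      rw [hwd]
      rw [List.take_append, List.take_of_length_le (by omega)]
      simp
    by_cases hfin : pvStep pat fail w k = pat.length
    · rw [if_pos hfin]
      have hsuf : pat <:+ done ++ [w] := by
        have h := pvBord_suffix pat (done ++ [w])
        rw [← hk2, hfin, List.take_length] at h
        exact h
      have hmle : pat.length ≤ done.length + 1 := by
        have := hsuf.length_le
        simpa using this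
      set p0 := done.length + 1 - pat.length with hp0
      have hocc : (words.drop p0).take pat.length = pat := by
        obtain ⟨u, hu⟩ := hsuf
        have hul : u.length = p0 := by
          have := congrArg List.length hu
          simp at this
          omega
        have hdt : (words.take (done.length + 1)).drop p0 = pat := by
          rw [htake, ← hu, ← hul, List.drop_left]
        rw [List.drop_take] at hdt
        rw [show done.length + 1 - p0 = pat.length by omega] at hdt
        exact hdt
      have hfind : (List.range (words.length + 1)).find?
          (fun p => ((words.drop p).take pat.length == pat)) = some p0 := by
        rw [find?_sorted_eq_some _ _ List.pairwise_lt_range]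
        refine ⟨List.mem_range.mpr (by omega), by simpa using hocc, ?_⟩
        intro b _ pb
        by_contra hbl
        push Not at hbl
        have hocb : (words.drop b).take pat.length = pat := by simpa using pb
        exact hno b (by omega) hocb
      unfold pvNaiveNat
      rw [hfind]
      have e1 : ((p0 : Int)) = (done.length : Int) - pat.length + 1 := by omega
      have e2 : ((p0 : Int)) + (pat.length : Int) = (done.length : Int) + 1 := by omega
      show PySem.List.pyRange ((done.length : Int) - (pat.length : Int) + 1) ((done.length : Int) + 1) 1 =
        PySem.List.pyRange ((p0 : Int)) ((p0 : Int) + (pat.length : Int)) 1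
      rw [e1]
      congr 1
      omega
    · rw [if_neg hfin]
      have hk2m : pvStep pat fail w k < pat.length := by
        have h1 : pvStep pat fail w k ≤ pat.length := by
          rw [hk2]; exact pvBord_le _ _
        omega
      have hno' : ∀ p, p + pat.length ≤ (done ++ [w]).length →
          ¬ ((((done ++ [w]) ++ rest'.map Prod.fst).drop p).take pat.length = pat) := by
        intro p hp hocc
        rw [← hwords] at hocc
        simp only [List.length_append, List.length_cons, List.length_nil] at hp
        rcases Nat.lt_or_ge (p + pat.length) (done.length + 1) with hlt | hge
        · exact hno p (by omega) hocc
        · have hpm : p + pat.length = done.length + 1 := by omega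
          have hsuf2 : pat <:+ words.take (p + pat.length) := pvOcc_suffix words pat p hocc
          rw [hpm, htake] at hsuf2
          have : pat.length ≤ pvBord pat (done ++ [w]) := by
            apply pvLe_bord pat _ _ le_rfl
            rw [List.take_length]
            exact hsuf2
          have := pvBord_le pat (done ++ [w])
          apply hfin
          omega
      have ihh := ih (done ++ [w]) (pvStep pat fail w k) hk2 hk2m hno'
      rw [← hwords] at ihh
      simp only [List.length_append, List.length_cons, List.length_nil] at ihh
      simpa using ihh

-- ===== VERDICT placeholder =====
theorem find_index_for_phrase_py_spec : Claim_equal_find_index_for_phrase_py := by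
  intro tags_list phrase_tokens _ hpre
  unfold Spec_find_index_for_phrase_py
  by_cases hph : phrase_tokens = []
  · subst hph
    rcases hpre with h | h
    · exact absurd rfl h
    · subst h; rfl
  · have hm : 0 < phrase_tokens.length := List.length_pos_of_ne_nil hph
    rw [pvA_eq_naiveInt tags_list phrase_tokens hph, pvNaiveInt_eq_nat _ _ hph]
    show _ = find_index_for_phrase_py_alt tags_list phrase_tokens
    unfold find_index_for_phrase_py_alt
    rw [if_neg (by omega)]
    have hok1 : pvFailOK phrase_tokens (List.replicate phrase_tokens.length 0) 1 := by
      intro q h1 h2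
      have hq : q = 1 := by omega
      subst hq
      have hz : (List.replicate phrase_tokens.length (0 : Nat)).getD 0 0 = 0 := by
        rw [List.getD_eq_getElem?_getD, List.getElem?_replicate]
        split <;> rfl
      have hnil : (phrase_tokens.take 1).drop 1 = ([] : List String) := by
        apply List.drop_eq_nil_of_le
        simp [List.length_take]
      rw [hz, hnil, pvBord_nil]
    have hb1 : (0 : Nat) = pvBord phrase_tokens ((phrase_tokens.take 1).drop 1) := by
      have hnil : (phrase_tokens.take 1).drop 1 = ([] : List String) := by
        apply List.drop_eq_nil_of_le
        simp [List.length_take]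
      rw [hnil, pvBord_nil]
    have hfail := pvFailLoop_spec phrase_tokens (phrase_tokens.length - 1) 1
      (List.replicate phrase_tokens.length 0) 0 le_rfl (by omega) (by simp) hok1 hb1
    have hsearch := pvSearch_spec phrase_tokens _ hph hfail tags_list [] 0
      (by rw [pvBord_nil]) hm
      (by intro p hp _; rw [List.length_nil] at hp; omega)
    simpa using hsearch.symm
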